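-- pv_equiv track=rewrite | github.com/YoungmyoungKim/Programmers | 스킬트리.py | solution
-- ===== SOURCE A (Python) =====
-- def solution(skill, skill_trees):
--     answer = 0
--     order=list(skill)
--     for tree in skill_trees:
--         temp=[]
--         for item in tree:
--             if item in skill:
--                 temp.append(item)
--         for i in range(len(order)+1):
--             if order[:i]==temp:
--                 answer+=1
--                 break
--     return answer
-- ===== SOURCE B (Python) =====
-- def solution(skill, skill_trees):
--     answer = 0
--     for tree in skill_trees:
--         rem = list(skill)
--         ok = True
--         for c in tree:
--             if c in skill:
--                 if not rem or c != rem[0]: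
--                     ok = False
--                     break
--                 rem = rem[1:]
--         if ok:
--             answer += 1
--     return answer
-- ===== Notes on version B (the rewrite author's own statement) =====
-- stated objective: faster
-- what changed: B replaces A's build-a-filtered-temp-list-then-try-every-prefix-slice check with a single incremental scan per tree that consumes the remaining skill order, removing the temp list and the quadratic slice-comparison loop.
import Mathlib
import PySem

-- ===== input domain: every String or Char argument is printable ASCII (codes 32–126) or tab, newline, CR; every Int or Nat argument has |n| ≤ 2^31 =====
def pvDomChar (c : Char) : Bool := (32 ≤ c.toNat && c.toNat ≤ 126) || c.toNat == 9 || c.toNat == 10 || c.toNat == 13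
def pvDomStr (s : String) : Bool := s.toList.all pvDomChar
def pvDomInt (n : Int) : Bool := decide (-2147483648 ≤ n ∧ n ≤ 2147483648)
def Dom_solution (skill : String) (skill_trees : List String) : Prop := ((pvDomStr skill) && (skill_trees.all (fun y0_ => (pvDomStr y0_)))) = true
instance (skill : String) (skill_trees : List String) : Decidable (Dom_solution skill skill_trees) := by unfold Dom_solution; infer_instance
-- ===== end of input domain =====

-- B replaces A's filtered-temp-list + try-every-prefix-slice check with one incremental
-- scan per tree consuming the remaining skill order; same return value, simpler.


-- ===== PORT A =====
-- inner 'for i in range(len(order)+1): if order[:i]==temp: answer+=1; break'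
def pvInnerA (order temp : List Char) (l : List Int) (answer : Int) : Int :=
  match l with
  | [] => answer
  | i :: is => if PySem.List.slice order none (some i) = temp then answer + 1
               else pvInnerA order temp is answer

def solution (skill : String) (skill_trees : List String) : Int :=
  let order := skill.toList
  skill_trees.foldl (fun answer tree =>
    -- 'item in skill' is a single-char substring test: PySem.Chars.isIn [item] (exact)
    let temp := tree.toList.foldl (fun temp item =>
      if PySem.Chars.isIn [item] skill.toList then temp ++ [item] else temp) []
    pvInnerA order temp (PySem.List.pyRange 0 ((order.length : Int) + 1) 1) answer) 0

-- ===== PORT B =====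
-- one pass over the tree, consuming the remaining skill order ('rem' in Source B)
def pvScanB (skill : List Char) (rem : List Char) (cs : List Char) : Bool :=
  match cs with
  | [] => true
  | c :: cs' =>
    if PySem.Chars.isIn [c] skill then
      match rem with
      | [] => false
      | d :: ds => if c = d then pvScanB skill ds cs' else false
    else pvScanB skill rem cs'

def solution_alt (skill : String) (skill_trees : List String) : Int :=
  skill_trees.foldl (fun answer tree =>
    if pvScanB skill.toList skill.toList tree.toList then answer + 1 else answer) 0

-- ===== PRECONDITION & SPEC =====
def Spec_solution (skill : String) (skill_trees : List String) (out : Int) : Prop := out = solution_alt skill skill_trees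
instance (skill : String) (skill_trees : List String) (out : Int) : Decidable (Spec_solution skill skill_trees out) := by unfold Spec_solution; infer_instance

-- ===== CLAIM (what is proved, stated in full; the proofs are below) =====
def Claim_equal_solution : Prop := ∀ (skill : String) (skill_trees : List String), Dom_solution skill skill_trees → Spec_solution skill skill_trees (solution skill skill_trees)

-- ===== LEMMAS AND PROOFS =====

-- A's temp accumulation is a filter
lemma temp_eq_filter (sk : List Char) (tree : List Char) :
    tree.foldl (fun temp item =>
      if PySem.Chars.isIn [item] sk then temp ++ [item] else temp) []
      = tree.filter (fun c => PySem.Chars.isIn [c] sk) := by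
  simpa using PySem.List.foldl_append_if (fun c => PySem.Chars.isIn [c] sk) id tree []

-- B's scan succeeds iff the filtered tree is a prefix of the remaining order
lemma scanB_iff (sk : List Char) (cs rem : List Char) :
    pvScanB sk rem cs = true ↔ (cs.filter (fun c => PySem.Chars.isIn [c] sk)) <+: rem := by
  induction cs generalizing rem with
  | nil => simp [pvScanB]
  | cons c cs' ih =>
    by_cases h : PySem.Chars.isIn [c] sk
    · cases rem with
      | nil => simp [pvScanB, h]
      | cons d ds =>
        by_cases hcd : c = d
        · subst hcd
          simp [pvScanB, h, ih, List.prefix_cons_iff]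
        · simp [pvScanB, h, hcd, List.prefix_cons_iff]
    · simp [pvScanB, h, ih]

-- A's inner loop bumps the answer iff some slice bound matches
lemma innerA_eq (order temp : List Char) (l : List Int) (ans : Int) :
    pvInnerA order temp l ans
      = if ∃ i ∈ l, PySem.List.slice order none (some i) = temp then ans + 1 else ans := by
  induction l with
  | nil => simp [pvInnerA]
  | cons i is ih =>
    by_cases h : PySem.List.slice order none (some i) = temp
    · simp [pvInnerA, h]
    · simp [pvInnerA, h, ih]

-- some prefix-slice of order equals temp iff temp is a prefix of order
lemma exists_slice_iff (order temp : List Char) :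
    (∃ i ∈ PySem.List.pyRange 0 ((order.length : Int) + 1) 1,
        PySem.List.slice order none (some i) = temp) ↔ temp <+: order := by
  constructor
  · rintro ⟨i, hmem, hsl⟩
    rw [PySem.List.mem_pyRange_one] at hmem
    rw [PySem.List.slice_to order hmem.1] at hsl
    exact hsl ▸ List.take_prefix _ _
  · intro hp
    refine ⟨(temp.length : Int), ?_, ?_⟩
    · rw [PySem.List.mem_pyRange_one]
      have := hp.length_le
      omega
    · rw [PySem.List.slice_to order (by positivity)]
      simpa using (List.prefix_iff_eq_take.mp hp).symm

-- ===== VERDICT (by name: the statement is the Claim_ definition above) =====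
theorem solution_spec : Claim_equal_solution := by
  intro skill skill_trees hdom
  clear hdom
  unfold Spec_solution solution solution_alt
  induction skill_trees using List.reverseRecOn with
  | nil => rfl
  | append_singleton ts t ih =>
    simp only [List.foldl_append, List.foldl_cons, List.foldl_nil, ih]
    simp only [temp_eq_filter, innerA_eq, exists_slice_iff]
    by_cases h : pvScanB skill.toList skill.toList t.toList = true
    · rw [if_pos ((scanB_iff _ _ _).mp h), if_pos h]
    · rw [if_neg (fun hp => h ((scanB_iff _ _ _).mpr hp)), if_neg h]
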